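-- pv_equiv track=rewrite | github.com/pdanbi00/algorithm | 백준/Gold/20327. 배열 돌리기 6/배열 돌리기 6.py | operation7
-- ===== SOURCE A (Python) =====
-- def operation7(arr, l):
--     le = len(arr)
--     ans = [[0]*le for _ in range(le)]
--     sub_size = (1 << l)
--     sub_count = le // sub_size
--     for i in range(sub_count):
--         for j in range(sub_count):
--             x1 = i * sub_size
--             y1 = j * sub_size
--             x2 = (sub_count-1-j) * sub_size
--             y2 = i * sub_size
--             for x in range(sub_size):
--                 for y in range(sub_size):
--                     ans[x1+x][y1+y] = arr[x2+x][y2+y]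
--     return ans
-- ===== SOURCE B (Python) =====
-- def operation7(arr, l):
--     # Staged pipeline: 1) carve the array into a c x c grid of s x s block
--     # matrices via slicing; 2) rotate the GRID itself clockwise with
--     # zip(*reversed(blocks)); 3) reassemble each output row by zipping the
--     # blocks of a rotated block-row together and flattening.
--     le = len(arr)
--     s = 1 << l
--     c = le // s
--     blocks = [[[row[j*s:(j+1)*s] for row in arr[i*s:(i+1)*s]] for j in range(c)]
--               for i in range(c)]
--     rot = [list(t) for t in zip(*reversed(blocks))]
--     pad = [0] * (le - c*s)
--     body = [[v for part in parts for v in part] + pad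
--             for brow in rot for parts in zip(*brow)]
--     return body + [[0]*le for _ in range(le - c*s)]
-- ===== Notes on version B (the rewrite author's own statement) =====
-- stated objective: alternative
-- what changed: A scatters single elements into a preallocated zero matrix with four nested index loops; B is a staged pipeline: it slices the array into a c x c grid of s x s block matrices, rotates the grid itself clockwise with zip(*reversed(blocks)), and reassembles each output row by zipping the blocks of a rotated block-row together and flattening, with leftover rows/columns padded with zeros.
import Mathlib
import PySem

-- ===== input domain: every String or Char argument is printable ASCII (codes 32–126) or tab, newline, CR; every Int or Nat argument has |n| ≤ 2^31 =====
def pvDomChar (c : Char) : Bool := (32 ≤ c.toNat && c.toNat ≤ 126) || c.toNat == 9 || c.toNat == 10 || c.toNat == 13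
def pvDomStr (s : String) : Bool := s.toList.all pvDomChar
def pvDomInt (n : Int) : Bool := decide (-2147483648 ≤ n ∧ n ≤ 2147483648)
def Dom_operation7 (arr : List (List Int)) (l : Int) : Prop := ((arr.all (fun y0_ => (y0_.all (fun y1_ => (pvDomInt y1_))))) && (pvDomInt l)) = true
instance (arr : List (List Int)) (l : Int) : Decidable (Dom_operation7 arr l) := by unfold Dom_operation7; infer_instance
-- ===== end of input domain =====

-- B is a staged pipeline: carve the array into a block grid by slicing, rotate the grid
-- itself with zip(*reversed(blocks)), and reassemble rows by zipping block rows and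
-- flattening — instead of A's element-by-element scatter into a zero matrix; objective:
-- alternative decomposition, same asymptotic cost.

-- ===== PORT A =====
-- ans[p][q] = v; in A every written index is nonnegative and in range, so List.set is exact.
def pvSet2 (M : List (List Int)) (p q : Nat) (v : Int) : List (List Int) :=
  M.set p ((M.getD p []).set q v)

-- 1 << l = 2^l for l ≥ 0 (l < 0 raises in Python, excluded by Pre_);
-- arr[r][c] has nonnegative indices here: the row index is always in range, the column
-- access raises exactly on the inputs Pre_ excludes, so getD's default is never reached on Pre_.
def operation7 (arr : List (List Int)) (l : Int) : List (List Int) :=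
  let le := arr.length
  let ans := List.replicate le (List.replicate le (0 : Int))
  let s := 1 <<< l.toNat
  let c := le / s
  (List.range c).foldl (fun ans i =>
    (List.range c).foldl (fun ans j =>
      (List.range s).foldl (fun ans x =>
        (List.range s).foldl (fun ans y =>
          pvSet2 ans (i*s+x) (j*s+y) ((arr.getD ((c-1-j)*s+x) []).getD (i*s+y) 0)) ans) ans) ans) ans

-- ===== PORT B =====
-- zip(*m): columns up to the shortest row; exact Python zip semantics (truncate to the
-- minimum length; every index read is below every row's length, so getD never defaults).
def pyZipStar {α : Type} [Inhabited α] (m : List (List α)) : List (List α) :=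
  match (m.map List.length).min? with
  | none => []
  | some n => (List.range n).map (fun k => m.map (fun r => r.getD k default))

-- slices have nonnegative bounds here, so arr[a:b] is drop/take (exact for 0 ≤ a ≤ b).
def operation7_alt (arr : List (List Int)) (l : Int) : List (List Int) :=
  let le := arr.length
  let s := 1 <<< l.toNat
  let c := le / s
  let blocks := (List.range c).map (fun i => (List.range c).map (fun j =>
      ((arr.drop (i*s)).take s).map (fun row => (row.drop (j*s)).take s)))
  let rot := pyZipStar blocks.reverse
  let pad := List.replicate (le - c*s) (0 : Int)
  let body := rot.flatMap (fun brow => (pyZipStar brow).map (fun parts => parts.flatten ++ pad))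
  body ++ (List.range (le - c*s)).map (fun _ => List.replicate le (0 : Int))

-- ===== PRECONDITION & SPEC =====
-- Pre_ excludes exactly the inputs where A raises: l < 0 (1 << l is a ValueError) and
-- arrays whose first sub_count*sub_size rows are shorter than sub_count*sub_size
-- (IndexError on arr[x2+x][y2+y]).
def Pre_operation7 (arr : List (List Int)) (l : Int) : Prop :=
  0 ≤ l ∧ ∀ row ∈ arr.take ((arr.length / (1 <<< l.toNat)) * (1 <<< l.toNat)),
    (arr.length / (1 <<< l.toNat)) * (1 <<< l.toNat) ≤ row.length
instance (arr : List (List Int)) (l : Int) : Decidable (Pre_operation7 arr l) := by unfold Pre_operation7; infer_instance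
def pvWitness_operation7 : List (List Int) × Int := ([[1,2],[3,4]], 0)

def Spec_operation7 (arr : List (List Int)) (l : Int) (out : List (List Int)) : Prop := out = operation7_alt arr l
instance (arr : List (List Int)) (l : Int) (out : List (List Int)) : Decidable (Spec_operation7 arr l out) := by unfold Spec_operation7; infer_instance

-- ===== CLAIM (what is proved, stated in full; the proofs are below) =====
def Claim_equal_operation7 : Prop := ∀ (arr : List (List Int)) (l : Int), Dom_operation7 arr l → Pre_operation7 arr l → Spec_operation7 arr l (operation7 arr l)

-- ===== LEMMAS AND PROOFS =====

theorem pvLtMul {i x c s : Nat} (hi : i < c) (hx : x < s) : i*s+x < c*s := by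
  calc i*s+x < i*s+s := by omega
    _ = (i+1)*s := by ring
    _ ≤ c*s := Nat.mul_le_mul_right s hi

theorem pvRangeMulMap {α : Type} (c s : Nat) (f : Nat → α) :
    (List.range (c*s)).map f
      = (List.range c).flatMap (fun i => (List.range s).map (fun x => f (i*s+x))) := by
  induction c with
  | zero => simp
  | succ c ih =>
    rw [List.range_succ, List.flatMap_append]
    have h : (c+1)*s = c*s + s := by ring
    rw [h, List.range_add, List.map_append, ih]
    simp [Function.comp_def]

theorem pvFlatMapCongr {α β : Type} {l : List α} {f g : α → List β}
    (h : ∀ a ∈ l, f a = g a) : l.flatMap f = l.flatMap g := by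
  simp only [List.flatMap_def]
  rw [List.map_congr_left h]

theorem pvTakeDropMap (R : List Int) (a s : Nat) (h : a + s ≤ R.length) :
    (R.drop a).take s = (List.range s).map (fun y => R.getD (a+y) 0) := by
  apply List.ext_getElem
  · simp; omega
  · intro i h1 h2
    have hi : i < s := by simpa using h2
    have : a + i < R.length := by omega
    simp [List.getElem_take, List.getElem_drop, List.getElem?_eq_getElem this]

def pvG (arr : List (List Int)) (c s p q : Nat) : Int :=
  (arr.getD ((c-1-q/s)*s + p % s) []).getD ((p/s)*s + q % s) 0

def pvRow (arr : List (List Int)) (le c s p : Nat) : List Int :=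
  (List.range le).map (fun q => if p < c*s ∧ q < c*s then pvG arr c s p q else 0)

def pvSpec (arr : List (List Int)) (le c s : Nat) : List (List Int) :=
  (List.range le).map (pvRow arr le c s)

theorem pvDivMul {i x s : Nat} (hs : 0 < s) (hx : x < s) :
    (i*s+x)/s = i ∧ (i*s+x) % s = x := by
  constructor
  · rw [Nat.add_comm, Nat.add_mul_div_right _ _ hs, Nat.div_eq_of_lt hx, Nat.zero_add]
  · rw [Nat.add_comm, Nat.add_mul_mod_self_right, Nat.mod_eq_of_lt hx]

theorem lemma_B_gen (arr : List (List Int)) (c s r : Nat) (hs : 0 < s)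
    (hRlen : ∀ t : Nat, t < c*s → c*s ≤ (arr.getD t []).length) :
    ((List.range c).flatMap (fun i => (List.range s).map (fun x =>
      ((List.range c).flatMap (fun j =>
        ((arr.getD ((c-1-j)*s+x) []).drop (i*s)).take s)) ++ List.replicate r (0 : Int))))
      ++ (List.range r).map (fun _ => List.replicate (c*s+r) (0 : Int))
    = pvSpec arr (c*s+r) c s := by
  unfold pvSpec
  rw [List.range_add, List.map_append]
  congr 1
  · -- body rows
    rw [pvRangeMulMap c s (pvRow arr (c*s+r) c s)]
    symm
    apply pvFlatMapCongr
    intro i hi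
    rw [List.mem_range] at hi
    apply List.map_congr_left
    intro x hx
    rw [List.mem_range] at hx
    have hp : i*s+x < c*s := pvLtMul hi hx
    unfold pvRow
    rw [List.range_add, List.map_append]
    congr 1
    · -- first c*s entries of the row
      have hc1 : (List.range (c*s)).map
            (fun q => if i*s+x < c*s ∧ q < c*s then pvG arr c s (i*s+x) q else 0)
          = (List.range (c*s)).map (pvG arr c s (i*s+x)) := by
        apply List.map_congr_left
        intro q hq
        rw [List.mem_range] at hq
        simp [hp, hq]
      rw [hc1, pvRangeMulMap c s (pvG arr c s (i*s+x))]
      apply pvFlatMapCongr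
      intro j hj
      rw [List.mem_range] at hj
      have hr2 : (c-1-j)*s+x < c*s := pvLtMul (by omega) hx
      have hlen : i*s + s ≤ (arr.getD ((c-1-j)*s+x) []).length := by
        have h1 := hRlen _ hr2
        have h2 : (i+1)*s ≤ c*s := Nat.mul_le_mul_right s (by omega)
        have h3 : (i+1)*s = i*s+s := by ring
        omega
      symm
      rw [pvTakeDropMap _ (i*s) s hlen]
      apply List.map_congr_left
      intro y hy
      rw [List.mem_range] at hy
      unfold pvG
      rw [(pvDivMul hs hy).1, (pvDivMul hs hy).2, (pvDivMul hs hx).1, (pvDivMul hs hx).2]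
    · -- trailing zeros of the row
      rw [List.map_map]
      have : ∀ k ∈ List.range r,
          ((fun q => if i*s+x < c*s ∧ q < c*s then pvG arr c s (i*s+x) q else 0) ∘ (c*s + ·)) k
            = (0 : Int) := by
        intro k _
        simp only [Function.comp]
        have : ¬ (c*s + k < c*s) := by omega
        simp [this]
      rw [List.map_congr_left this, List.map_const', List.length_range]
  · -- zero rows
    rw [List.map_map]
    symm
    apply List.map_congr_left
    intro k _
    simp only [Function.comp]
    unfold pvRow
    have : ∀ q, ¬ (c*s+k < c*s ∧ q < c*s) := by omega
    simp only [this, if_false]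
    rw [List.map_const', List.length_range]

-- ---- B-side lemmas: characterising pyZipStar on rectangular input ----

theorem pvMinReplicate (c n : Nat) (hc : 0 < c) : (List.replicate c n).min? = some n := by
  induction c with
  | zero => omega
  | succ k ih =>
    rw [List.replicate_succ, List.min?_cons]
    cases k with
    | zero => simp
    | succ m => rw [ih (by omega)]; simp

theorem pvZipStarChar {α : Type} [Inhabited α] (c n : Nat) (hc : 0 < c) (f : Nat → List α)
    (hf : ∀ i < c, (f i).length = n) :
    pyZipStar ((List.range c).map f)
      = (List.range n).map (fun k => (List.range c).map (fun i => (f i).getD k default)) := by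
  unfold pyZipStar
  have h1 : (((List.range c).map f).map List.length) = List.replicate c n := by
    rw [List.map_map]
    apply List.ext_getElem
    · simp
    · intro i hi _
      simp only [List.getElem_map, List.getElem_range, Function.comp,
        List.getElem_replicate]
      exact hf i (by simpa using hi)
  rw [h1, pvMinReplicate c n hc]
  simp [List.map_map, Function.comp]

theorem pvReverseRangeMap {α : Type} (c : Nat) (f : Nat → α) :
    ((List.range c).map f).reverse = (List.range c).map (fun i => f (c-1-i)) := by
  apply List.ext_getElem
  · simp
  · intro i h1 h2
    have hi : i < c := by simpa using h2
    simp only [List.getElem_reverse, List.getElem_map, List.getElem_range,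
      List.length_map, List.length_range]

theorem lemma_B (arr : List (List Int)) (l : Int) (h : Pre_operation7 arr l) :
    operation7_alt arr l = pvSpec arr arr.length (arr.length / (1 <<< l.toNat)) (1 <<< l.toNat) := by
  obtain ⟨-, hrows⟩ := h
  simp only [operation7_alt]
  set s := 1 <<< l.toNat with hsdef
  set le := arr.length with hledef
  set c := le / s with hcdef
  have hs : 0 < s := by rw [hsdef, Nat.one_shiftLeft]; exact Nat.two_pow_pos _
  have hcs : c*s ≤ le := Nat.div_mul_le_self le s
  have hRlen : ∀ t : Nat, t < c*s → c*s ≤ (arr.getD t []).length := by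
    intro t ht
    have htle : t < le := by omega
    refine hrows _ ?_
    rw [List.getD_eq_getElem arr [] htle]
    have he : arr[t] = (arr.take (c*s))[t]'(by simp [← hledef]; omega) := (List.getElem_take ..).symm
    rw [he]; exact List.getElem_mem _
  have hsplit : le = c*s + (le - c*s) := by omega
  have hgen := lemma_B_gen arr c s (le - c*s) hs hRlen
  rw [← hsplit] at hgen
  rw [← hgen]
  congr 1
  -- bodies are equal
  rcases Nat.eq_zero_or_pos c with hc0 | hc
  · rw [hc0]
    simp [pyZipStar]
  · -- block i' j' : the s×s sub-matrix at block coordinates (i', j')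
    set B : Nat → Nat → List (List Int) := fun i' j' =>
      ((arr.drop (i'*s)).take s).map (fun row => (row.drop (j'*s)).take s) with hB
    have hBlen' : ∀ i' < c, ∀ j', (B i' j').length = s := by
      intro i' hi' j'
      have h2 : (i'+1)*s ≤ c*s := Nat.mul_le_mul_right s (by omega)
      have h3 : (i'+1)*s = i'*s + s := by ring
      simp only [hB, List.length_map, List.length_take, List.length_drop, ← hledef]
      omega
    -- 1. reverse of the block grid
    rw [pvReverseRangeMap]
    -- 2. rotate the grid: pyZipStar on the reversed, rectangular c×c grid
    rw [pvZipStarChar c c hc _ (fun i _ => by simp)]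
    -- 3. reassemble: flatMap over the rotated block rows
    rw [List.flatMap_map]
    apply pvFlatMapCongr
    intro k hk
    rw [List.mem_range] at hk
    have ha : ((List.range c).map (fun r =>
          ((List.range c).map (fun j => B (c-1-r) j)).getD k default))
        = (List.range c).map (fun r => B (c-1-r) k) := by
      apply List.map_congr_left
      intro r hr
      have hkl : k < ((List.range c).map (fun j => B (c-1-r) j)).length := by
        simpa using hk
      rw [List.getD_eq_getElem _ _ hkl]
      simp
    rw [ha, pvZipStarChar c s hc (fun r => B (c-1-r) k)
          (fun r hr => hBlen' (c-1-r) (by omega) k)]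
    symm
    rw [List.map_map]
    apply List.map_congr_left
    intro x hx
    rw [List.mem_range] at hx
    simp only [Function.comp]
    congr 1
    rw [← List.flatMap_def]
    apply pvFlatMapCongr
    intro r hr
    rw [List.mem_range] at hr
    have hic : c-1-r < c := by omega
    have hlt : (c-1-r)*s + x < c*s := pvLtMul hic hx
    have hle : (c-1-r)*s + x < le := by omega
    rw [List.getD_eq_getElem arr [] hle,
        List.getD_eq_getElem _ _ (by rw [hBlen' (c-1-r) hic k]; exact hx)]
    simp only [hB, List.getElem_map, List.getElem_take, List.getElem_drop]

-- ---- A-side lemmas: the scatter foldl characterised elementwise ----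

def pvGetE (M : List (List Int)) (p q : Nat) : Int := (M.getD p []).getD q 0

def pvKeys (c s : Nat) : List (Nat × Nat) :=
  (List.range c).flatMap (fun i => (List.range c).flatMap (fun j =>
    (List.range s).flatMap (fun x => (List.range s).map (fun y => (i*s+x, j*s+y)))))

theorem pvFoldlFlatMap {α β γ : Type} (f : α → List β) (step : γ → β → γ) :
    ∀ (L : List α) (M : γ),
      L.foldl (fun m a => (f a).foldl step m) M = (L.flatMap f).foldl step M := by
  intro L
  induction L with
  | nil => intro M; simp
  | cons a L ih => intro M; simp [List.foldl_append, ih]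

theorem pvLenSet2 (M : List (List Int)) (p q : Nat) (v : Int) :
    (pvSet2 M p q v).length = M.length := by simp [pvSet2]

theorem pvRowsSet2 {n : Nat} {M : List (List Int)} (hM : ∀ row ∈ M, row.length = n)
    (p q : Nat) (v : Int) : ∀ row ∈ pvSet2 M p q v, row.length = n := by
  intro row hrow
  by_cases hp : p < M.length
  · rcases List.mem_or_eq_of_mem_set hrow with h | h
    · exact hM _ h
    · subst h
      simp only [List.length_set]
      rw [List.getD_eq_getElem M [] hp]
      exact hM _ (List.getElem_mem _)
  · unfold pvSet2 at hrow
    rw [List.set_eq_of_length_le (by omega)] at hrow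
    exact hM _ hrow

theorem pvFoldLen (G : Nat × Nat → Int) :
    ∀ (K : List (Nat × Nat)) (M : List (List Int)),
      (K.foldl (fun M w => pvSet2 M w.1 w.2 (G w)) M).length = M.length := by
  intro K
  induction K with
  | nil => intro M; simp
  | cons w K ih => intro M; rw [List.foldl_cons, ih, pvLenSet2]

theorem pvFoldRows (G : Nat × Nat → Int) {n : Nat} :
    ∀ (K : List (Nat × Nat)) (M : List (List Int)), (∀ row ∈ M, row.length = n) →
      ∀ row ∈ K.foldl (fun M w => pvSet2 M w.1 w.2 (G w)) M, row.length = n := by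
  intro K
  induction K with
  | nil => intro M hM; simpa using hM
  | cons w K ih =>
    intro M hM
    rw [List.foldl_cons]
    exact ih _ (pvRowsSet2 hM w.1 w.2 (G w))

theorem pvGetESet2 (M : List (List Int)) (p' q' p q : Nat) (v : Int)
    (hp' : p' < M.length) (hq' : q' < (M.getD p' []).length) :
    pvGetE (pvSet2 M p' q' v) p q
      = if p = p' ∧ q = q' then v else pvGetE M p q := by
  unfold pvGetE pvSet2
  rw [List.getD_eq_getElem?_getD] at hq'
  by_cases hpp : p = p' <;> by_cases hqq : q = q' <;>
    simp_all [List.getD_eq_getElem?_getD, List.getElem?_set] <;>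
    rw [if_neg (by omega)]

theorem pvFoldChar (G : Nat × Nat → Int) (le : Nat) :
    ∀ (K : List (Nat × Nat)) (M : List (List Int)),
      M.length = le → (∀ row ∈ M, row.length = le) →
      (∀ w ∈ K, w.1 < le ∧ w.2 < le) → ∀ p q : Nat,
      pvGetE (K.foldl (fun M w => pvSet2 M w.1 w.2 (G w)) M) p q
        = if (p,q) ∈ K then G (p,q) else pvGetE M p q := by
  intro K
  induction K with
  | nil => intro M _ _ _ p q; simp
  | cons w K ih =>
    intro M hlen hrows hK p q
    obtain ⟨a, b⟩ := w
    have hw := hK (a, b) List.mem_cons_self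
    have hb : b < (M.getD a []).length := by
      rw [List.getD_eq_getElem M [] (by omega)]
      rw [hrows _ (List.getElem_mem _)]
      exact hw.2
    rw [List.foldl_cons,
        ih (pvSet2 M a b (G (a,b))) (by rw [pvLenSet2]; exact hlen)
          (pvRowsSet2 hrows a b _) (fun w hw => hK w (List.mem_cons_of_mem _ hw)) p q,
        pvGetESet2 M a b p q _ (by omega) hb]
    by_cases hmem : (p,q) ∈ K
    · simp [hmem, List.mem_cons]
    · by_cases hpq : p = a ∧ q = b
      · obtain ⟨rfl, rfl⟩ := hpq
        simp [List.mem_cons]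
      · rw [if_neg hmem, if_neg hpq, if_neg (by simp [List.mem_cons]; exact ⟨fun h1 h2 => hpq ⟨h1, h2⟩, hmem⟩)]

theorem pvMemKeys (c s p q : Nat) (hs : 0 < s) :
    (p,q) ∈ pvKeys c s ↔ p < c*s ∧ q < c*s := by
  unfold pvKeys
  simp only [List.mem_flatMap, List.mem_map, List.mem_range, Prod.mk.injEq]
  constructor
  · rintro ⟨i, hi, j, hj, x, hx, y, hy, hp, hq⟩
    exact ⟨hp ▸ pvLtMul hi hx, hq ▸ pvLtMul hj hy⟩
  · rintro ⟨hp, hq⟩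
    exact ⟨p / s, (Nat.div_lt_iff_lt_mul hs).2 hp,
           q / s, (Nat.div_lt_iff_lt_mul hs).2 hq,
           p % s, Nat.mod_lt _ hs,
           q % s, Nat.mod_lt _ hs,
           Nat.div_add_mod' p s, Nat.div_add_mod' q s⟩

theorem pvGetEInit (le p q : Nat) :
    pvGetE (List.replicate le (List.replicate le (0 : Int))) p q = 0 := by
  unfold pvGetE
  simp only [List.getD_eq_getElem?_getD, List.getElem?_replicate]
  split_ifs <;> simp

theorem pvFlattenA (arr : List (List Int)) (c s : Nat) (hs : 0 < s) (M : List (List Int)) :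
    (List.range c).foldl (fun ans i =>
      (List.range c).foldl (fun ans j =>
        (List.range s).foldl (fun ans x =>
          (List.range s).foldl (fun ans y =>
            pvSet2 ans (i*s+x) (j*s+y) ((arr.getD ((c-1-j)*s+x) []).getD (i*s+y) 0)) ans) ans) ans) M
    = (pvKeys c s).foldl (fun M w => pvSet2 M w.1 w.2 (pvG arr c s w.1 w.2)) M := by
  unfold pvKeys
  rw [← pvFoldlFlatMap]
  apply PySem.List.foldl_congr_mem'
  intro i hi M1
  rw [← pvFoldlFlatMap]
  apply PySem.List.foldl_congr_mem'
  intro j hj M2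
  rw [← pvFoldlFlatMap]
  apply PySem.List.foldl_congr_mem'
  intro x hx M3
  rw [List.mem_range] at hx
  rw [List.foldl_map]
  symm
  apply PySem.List.foldl_congr_mem'
  intro y hy M4
  rw [List.mem_range] at hy
  unfold pvG
  rw [(pvDivMul hs hy).1, (pvDivMul hs hy).2, (pvDivMul hs hx).1, (pvDivMul hs hx).2]

theorem lemma_A (arr : List (List Int)) (l : Int) :
    operation7 arr l = pvSpec arr arr.length (arr.length / (1 <<< l.toNat)) (1 <<< l.toNat) := by
  simp only [operation7]
  set s := 1 <<< l.toNat with hsdef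
  set le := arr.length with hledef
  set c := le / s with hcdef
  have hs : 0 < s := by rw [hsdef, Nat.one_shiftLeft]; exact Nat.two_pow_pos _
  have hcs : c*s ≤ le := Nat.div_mul_le_self le s
  rw [pvFlattenA arr c s hs]
  have hK : ∀ w ∈ pvKeys c s, w.1 < le ∧ w.2 < le := by
    intro w hw
    obtain ⟨a, b⟩ := w
    have := (pvMemKeys c s a b hs).1 hw
    exact ⟨by omega, by omega⟩
  have hM0len : (List.replicate le (List.replicate le (0:Int))).length = le := by simp
  have hM0rows : ∀ row ∈ List.replicate le (List.replicate le (0:Int)), row.length = le := by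
    intro row hrow
    rw [List.eq_of_mem_replicate hrow]; simp
  set F := (pvKeys c s).foldl (fun M w => pvSet2 M w.1 w.2 (pvG arr c s w.1 w.2))
      (List.replicate le (List.replicate le (0:Int))) with hF
  have hFlen : F.length = le := by rw [hF, pvFoldLen]; exact hM0len
  have hFrows : ∀ row ∈ F, row.length = le := by
    rw [hF]; exact pvFoldRows _ _ _ hM0rows
  have hchar : ∀ p q : Nat, pvGetE F p q
      = if p < c*s ∧ q < c*s then pvG arr c s p q else 0 := by
    intro p q
    rw [hF, pvFoldChar (fun w => pvG arr c s w.1 w.2) le _ _ hM0len hM0rows hK p q,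
        pvGetEInit]
    by_cases hmem : (p,q) ∈ pvKeys c s
    · rw [if_pos hmem, if_pos ((pvMemKeys c s p q hs).1 hmem)]
    · rw [if_neg hmem, if_neg (fun h => hmem ((pvMemKeys c s p q hs).2 h))]
  apply List.ext_getElem
  · rw [hFlen]; simp [pvSpec]
  · intro p hp1 hp2
    have hple : p < le := by rwa [hFlen] at hp1
    have hrowF : F[p].length = le := hFrows _ (List.getElem_mem _)
    have hspecrow : (pvSpec arr le c s)[p] = pvRow arr le c s p := by
      simp [pvSpec]
    rw [hspecrow]
    apply List.ext_getElem
    · rw [hrowF]; simp [pvRow]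
    · intro q hq1 hq2
      have hqle : q < le := by rwa [hrowF] at hq1
      have h1 : F[p][q] = pvGetE F p q := by
        unfold pvGetE
        rw [List.getD_eq_getElem F [] hp1, List.getD_eq_getElem _ 0 hq1]
      rw [h1, hchar p q]
      simp [pvRow]

-- ===== VERDICT (by name: the statement is the Claim_ definition above) =====
theorem operation7_spec : Claim_equal_operation7 := by
  intro arr l _ hpre
  unfold Spec_operation7
  rw [lemma_A arr l, lemma_B arr l hpre]
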